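-- pv_equiv track=rewrite | github.com/NahidaNahida/doss_repo | code/util/data_conversion.py | number_list_generation
-- ===== SOURCE A (Python) =====
-- def number_list_generation(n, m):
--     '''
--         Generation all the number with n digits in base m
--
--         Input variables:
--             + n             [int]
--             + m             [int]
--
--         Output variable:
--             + numbers       [list]  the list of numbers
--     '''
--     if n <= 0:
--         return [[]]                     # return the empty list
--     if n == 1:
--         return [[i] for i in range(m)]  # generate numbers with n = 1
--
--     # recursive procedure
--     smaller_numbers = number_list_generation(n - 1, m)
--     numbers = []
--     for digit in range(m):
--         for smaller_number in smaller_numbers: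
--             numbers.append([digit] + smaller_number)
--
--     return numbers
-- ===== SOURCE B (Python) =====
-- def number_list_generation(n, m):
--     numbers = [[]]
--     for _ in range(n):
--         numbers = [num + [d] for num in numbers for d in range(m)]
--     return numbers
-- ===== Notes on version B (the rewrite author's own statement) =====
-- stated objective: simpler
-- what changed: Replaces the recursion on n (which prepends each digit to every shorter number) with an iterative product build: start from [[]] and n times extend every partial number by appending each digit of range(m); Pre_ excludes n > 950, near CPython's recursion limit where A raises RecursionError while the exact cutoff depends on caller stack depth.
-- outside the precondition, e.g. on number_list_generation(955, 0): A returns [], B returns []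
import Mathlib
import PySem

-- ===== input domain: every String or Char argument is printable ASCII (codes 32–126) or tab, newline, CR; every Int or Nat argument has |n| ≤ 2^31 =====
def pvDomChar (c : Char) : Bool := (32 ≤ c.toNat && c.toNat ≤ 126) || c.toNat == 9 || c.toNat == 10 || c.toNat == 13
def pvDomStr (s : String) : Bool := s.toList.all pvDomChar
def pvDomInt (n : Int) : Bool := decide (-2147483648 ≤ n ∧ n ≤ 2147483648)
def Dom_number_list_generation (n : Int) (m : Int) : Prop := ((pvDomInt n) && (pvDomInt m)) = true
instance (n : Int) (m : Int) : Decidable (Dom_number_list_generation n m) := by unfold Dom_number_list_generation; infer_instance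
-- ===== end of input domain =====

-- B replaces A's recursion on n (prepend digit to shorter numbers) by an iterative
-- product build appending one digit per round; objective: simpler, same cost.


-- ===== PORT A =====
def number_list_generation (n : Int) (m : Int) : List (List Int) :=
  if n ≤ 0 then [[]]
  else if n = 1 then (PySem.List.pyRange 0 m 1).map (fun i => [i])
  else
    let smaller_numbers := number_list_generation (n - 1) m
    (PySem.List.pyRange 0 m 1).foldl
      (fun numbers digit =>
        smaller_numbers.foldl (fun numbers sn => numbers ++ [digit :: sn]) numbers) []
termination_by n.toNat
decreasing_by omega

-- ===== PORT B =====
def number_list_generation_alt (n : Int) (m : Int) : List (List Int) :=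
  (PySem.List.pyRange 0 n 1).foldl
    (fun numbers _ =>
      numbers.flatMap (fun num => (PySem.List.pyRange 0 m 1).map (fun d => num ++ [d])))
    [[]]

-- ===== PRECONDITION & SPEC =====
-- Pre_ excludes n > 950: A recurses once per digit, so around CPython's default recursion
-- limit of 1000 it raises RecursionError (the exact cutoff depends on the caller's stack
-- depth, hence the conservative bound 950); iterative B still returns there.
def Pre_number_list_generation (n : Int) (m : Int) : Prop := n ≤ 950
instance (n : Int) (m : Int) : Decidable (Pre_number_list_generation n m) := by unfold Pre_number_list_generation; infer_instance
def pvWitness_number_list_generation : Int × Int := (3, 2)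
def Spec_number_list_generation (n : Int) (m : Int) (out : List (List Int)) : Prop := out = number_list_generation_alt n m
instance (n : Int) (m : Int) (out : List (List Int)) : Decidable (Spec_number_list_generation n m out) := by unfold Spec_number_list_generation; infer_instance

-- ===== CLAIM (what is proved, stated in full; the proofs are below) =====
def Claim_equal_number_list_generation : Prop := ∀ (n : Int) (m : Int), Dom_number_list_generation n m → Pre_number_list_generation n m → Spec_number_list_generation n m (number_list_generation n m)

-- ===== LEMMAS AND PROOFS =====

-- B's one round: append each digit at the end of every partial number
def stepF (m : Int) (xs : List (List Int)) : List (List Int) :=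
  xs.flatMap (fun num => (PySem.List.pyRange 0 m 1).map (fun d => num ++ [d]))

-- A's one round: prepend each digit to every smaller number
def stepG (m : Int) (xs : List (List Int)) : List (List Int) :=
  (PySem.List.pyRange 0 m 1).flatMap (fun d => xs.map (fun sn => d :: sn))

theorem stepF_stepG_comm (m : Int) : Function.Commute (stepF m) (stepG m) := by
  intro xs
  simp only [stepF, stepG, List.map_flatMap, List.map_map]
  rw [List.flatMap_assoc]
  simp [List.flatMap_map, Function.comp_def]

theorem stepF_base (m : Int) : stepF m [[]] = stepG m [[]] := by
  simp only [stepF, stepG, List.flatMap_cons, List.flatMap_nil, List.map_cons, List.map_nil,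
    List.append_nil, List.nil_append]
  induction PySem.List.pyRange 0 m 1 with
  | nil => rfl
  | cons a t ih => simp [ih]

theorem iter_stepF_eq_iter_stepG (m : Int) (k : Nat) :
    (stepF m)^[k] [[]] = (stepG m)^[k] [[]] := by
  induction k with
  | zero => rfl
  | succ k ih =>
    rw [Function.iterate_succ_apply', ih,
      ((stepF_stepG_comm m).iterate_right k).eq, stepF_base,
      ← Function.iterate_succ_apply]

-- A's inner foldl appends one digit at the head of every smaller number
theorem foldl_append_inner (digit : Int) (s : List (List Int)) (init : List (List Int)) :
    s.foldl (fun numbers sn => numbers ++ [digit :: sn]) init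
      = init ++ s.map (fun sn => digit :: sn) := by
  induction s generalizing init with
  | nil => simp
  | cons h t ih => simp [List.foldl_cons, ih]

theorem foldl_outer (s : List (List Int)) (R : List Int) (init : List (List Int)) :
    R.foldl (fun numbers digit =>
        s.foldl (fun numbers sn => numbers ++ [digit :: sn]) numbers) init
      = init ++ R.flatMap (fun d => s.map (fun sn => d :: sn)) := by
  induction R generalizing init with
  | nil => simp
  | cons d T ih =>
    rw [List.foldl_cons, foldl_append_inner, ih, List.flatMap_cons, List.append_assoc]

theorem A_eq_iter_stepG (m : Int) (k : Nat) (n : Int) (hk : n.toNat = k) :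
    number_list_generation n m = (stepG m)^[k] [[]] := by
  induction k generalizing n with
  | zero =>
    have hn : n ≤ 0 := by omega
    rw [number_list_generation]
    simp [hn]
  | succ k ih =>
    have hn : ¬ n ≤ 0 := by omega
    rw [number_list_generation]
    simp only [hn, if_false]
    by_cases h1 : n = 1
    · have hk0 : k = 0 := by omega
      subst h1 hk0
      simp only [if_true]
      rw [Function.iterate_succ_apply', Function.iterate_zero_apply, ← stepF_base]
      simp [stepF]
    · simp only [h1, if_false]
      rw [ih (n - 1) (by omega), foldl_outer, List.nil_append,
        Function.iterate_succ_apply']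
      rfl

theorem foldl_const_iter {a b : Type} (f : b -> b) (l : List a) (init : b) :
    l.foldl (fun acc _ => f acc) init = f^[l.length] init := by
  induction l generalizing init with
  | nil => rfl
  | cons h t ih => rw [List.foldl_cons, ih, List.length_cons, Function.iterate_succ_apply]

theorem B_eq_iter_stepF (n m : Int) :
    number_list_generation_alt n m = (stepF m)^[n.toNat] [[]] := by
  show (PySem.List.pyRange 0 n 1).foldl (fun acc _ => stepF m acc) [[]] = _
  rw [foldl_const_iter, PySem.List.length_pyRange_one]
  norm_num

-- ===== VERDICT (by name: the statement is the Claim_ definition above) =====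
theorem number_list_generation_spec : Claim_equal_number_list_generation := by
  intro n m _ _
  unfold Spec_number_list_generation
  rw [A_eq_iter_stepG m n.toNat n rfl, B_eq_iter_stepF, iter_stepF_eq_iter_stepG]
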